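-- pv_equiv track=rewrite | github.com/TwistAtom/Steganography | LibCrypto.py | melange_max
-- ===== SOURCE A (Python) =====
-- def melange_max(lst):
--     """
--     melange_max : Liste -> Integer
--     melange_max(lst) retourne la plus haut exposant
--     de 4 qui correspond au plus près de la longueur de la liste sans la depasser.
--     """
--     n = 1
--
--     while 4**n <= len(lst):
--         n += 1                #On utilise ce resultat pour faire le maximum de melange lors du cryptage
--
--     if n-1 >= 6:              #Si elle est trop grande cela entraine un temps de traitement trop long pour la suite du programme
--         n = 6                 #Donc nous la limiton afin que le programme traite des plus petit bout meme si il doit le faire plus de fois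
--         return n              #Cela permet de gagner un temps considerable
--     else:
--         return n-1
-- ===== SOURCE B (Python) =====
-- def melange_max(lst):
--     m = len(lst)
--     return min((max(m.bit_length(), 1) - 1) // 2, 6)
-- ===== Notes on version B (the rewrite author's own statement) =====
-- stated objective: simpler
-- what changed: Replaces the 4**n doubling loop and branch with a single closed-form expression from the bit length: min((max(m.bit_length(),1)-1)//2, 6).
import Mathlib
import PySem

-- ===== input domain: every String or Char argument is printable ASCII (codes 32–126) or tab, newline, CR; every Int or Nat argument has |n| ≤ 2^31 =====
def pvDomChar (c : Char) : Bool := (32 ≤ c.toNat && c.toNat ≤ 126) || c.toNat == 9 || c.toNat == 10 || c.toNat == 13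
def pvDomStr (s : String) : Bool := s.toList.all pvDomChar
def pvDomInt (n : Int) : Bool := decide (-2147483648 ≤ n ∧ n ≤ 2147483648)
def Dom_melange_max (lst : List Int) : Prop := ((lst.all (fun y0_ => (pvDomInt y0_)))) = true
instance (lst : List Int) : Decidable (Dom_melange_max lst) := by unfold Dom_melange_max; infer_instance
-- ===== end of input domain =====

-- B computes floor(log4 len) capped at 6 in one closed-form expression from the bit length, replacing A's 4**n loop (objective: simpler).


-- ===== PORT A =====
-- termination of A's while loop (4^n grows past m); cited by pvLoopA's decreasing_by
theorem pvLoopA_dec (m n : Nat) (h : 4 ^ n ≤ m) : m - (n + 1) < m - n := by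
  have h1 : n < 4 ^ n := Nat.lt_pow_self (by norm_num)
  omega

-- the while loop of A: n starts at 1, increments while 4**n <= len(lst)
def pvLoopA (m n : Nat) : Nat :=
  if h : 4 ^ n ≤ m then pvLoopA m (n + 1) else n
termination_by m - n
decreasing_by exact pvLoopA_dec m n h

def melange_max (lst : List Int) : Int :=
  let n := pvLoopA lst.length 1
  if (n : Int) - 1 ≥ 6 then 6 else (n : Int) - 1

-- ===== PORT B =====
-- m.bit_length(): number of binary digits of a nonnegative int (exact for m ≥ 0, the only case reached from len)
def pvBitLen (n : Nat) : Nat :=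
  if n = 0 then 0 else pvBitLen (n / 2) + 1
decreasing_by exact Nat.div_lt_self (by omega) (by norm_num)

def melange_max_alt (lst : List Int) : Int :=
  let m := lst.length
  min (((max (pvBitLen m) 1 - 1) / 2 : Nat) : Int) 6

-- ===== PRECONDITION & SPEC =====
def Spec_melange_max (lst : List Int) (out : Int) : Prop := out = melange_max_alt lst
instance (lst : List Int) (out : Int) : Decidable (Spec_melange_max lst out) := by unfold Spec_melange_max; infer_instance

-- ===== CLAIM (what is proved, stated in full; the proofs are below) =====
def Claim_equal_melange_max : Prop := ∀ (lst : List Int), Dom_melange_max lst → Spec_melange_max lst (melange_max lst)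

-- ===== LEMMAS AND PROOFS =====

-- bit-length bounds: for m ≥ 1, pvBitLen m ≥ 1 and 2^(bl-1) ≤ m < 2^bl
theorem pvBitLen_bounds : ∀ m : Nat, 1 ≤ m →
    1 ≤ pvBitLen m ∧ 2 ^ (pvBitLen m - 1) ≤ m ∧ m < 2 ^ (pvBitLen m) := by
  intro m
  induction m using Nat.strong_induction_on with
  | _ m ih =>
    intro hm
    rw [pvBitLen, if_neg (by omega : ¬ m = 0)]
    by_cases h1 : m = 1
    · subst h1; simp [pvBitLen]
    · have hdiv : 1 ≤ m / 2 := by omega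
      obtain ⟨hb1, hlo, hhi⟩ := ih (m / 2) (Nat.div_lt_self (by omega) (by norm_num)) hdiv
      set b := pvBitLen (m / 2) with hb
      refine ⟨by omega, ?_, ?_⟩
      · have he : 2 ^ (b + 1 - 1) = 2 * 2 ^ (b - 1) := by
          rw [Nat.add_sub_cancel]
          conv_lhs => rw [show b = (b - 1) + 1 by omega]
          ring
        rw [he]; omega
      · have he : 2 ^ (b + 1) = 2 * 2 ^ b := by ring
        rw [he]; omega

-- loop bounds: from n ≥ 1 with 4^(n-1) ≤ m, the loop result r satisfies r ≥ 1 and 4^(r-1) ≤ m < 4^r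
theorem pvLoopA_bounds (m n : Nat) : 1 ≤ n → 4 ^ (n - 1) ≤ m →
    1 ≤ pvLoopA m n ∧ 4 ^ (pvLoopA m n - 1) ≤ m ∧ m < 4 ^ (pvLoopA m n) := by
  induction n using pvLoopA.induct (m := m) with
  | case1 n h ih =>
    intro h1 h2
    rw [pvLoopA, dif_pos h]
    exact ih (by omega) (by simpa)
  | case2 n h =>
    intro h1 h2
    rw [pvLoopA, dif_neg h]
    exact ⟨h1, h2, by omega⟩

-- the two characterisations coincide: loop result minus 1 equals (bitlen-1)/2
theorem pvLoop_eq_bitlen (m : Nat) :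
    pvLoopA m 1 - 1 = (max (pvBitLen m) 1 - 1) / 2 := by
  by_cases hm : m = 0
  · subst hm
    have : pvLoopA 0 1 = 1 := by rw [pvLoopA]; simp
    simp [this, pvBitLen]
  · have hm1 : 1 ≤ m := by omega
    obtain ⟨hr1, hrlo, hrhi⟩ := pvLoopA_bounds m 1 (by omega) (by simpa)
    obtain ⟨hb1, hblo, hbhi⟩ := pvBitLen_bounds m hm1
    set r := pvLoopA m 1 with hr
    set b := pvBitLen m with hb
    have hmax : max b 1 = b := by omega
    rw [hmax]
    set k := (b - 1) / 2 with hk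
    -- 4^k ≤ m
    have hklo : 4 ^ k ≤ m := by
      have h2k : 2 * k ≤ b - 1 := by omega
      calc 4 ^ k = 2 ^ (2 * k) := by rw [Nat.pow_mul]
        _ ≤ 2 ^ (b - 1) := Nat.pow_le_pow_right (by norm_num) h2k
        _ ≤ m := hblo
    -- m < 4^(k+1)
    have hkhi : m < 4 ^ (k + 1) := by
      have h2k : b ≤ 2 * (k + 1) := by omega
      calc m < 2 ^ b := hbhi
        _ ≤ 2 ^ (2 * (k + 1)) := Nat.pow_le_pow_right (by norm_num) h2k
        _ = 4 ^ (k + 1) := by rw [Nat.pow_mul]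
    -- uniqueness
    have hlt1 : r - 1 < k + 1 := by
      have : 4 ^ (r - 1) < 4 ^ (k + 1) := lt_of_le_of_lt hrlo hkhi
      exact (Nat.pow_lt_pow_iff_right (by norm_num)).mp this
    have hlt2 : k < r := by
      have : 4 ^ k < 4 ^ r := lt_of_le_of_lt hklo hrhi
      exact (Nat.pow_lt_pow_iff_right (by norm_num)).mp this
    omega

-- ===== VERDICT (by name: the statement is the Claim_ definition above) =====
theorem melange_max_spec : Claim_equal_melange_max := by
  intro lst _
  unfold Spec_melange_max melange_max melange_max_alt
  have hkey := pvLoop_eq_bitlen lst.length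
  have hr1 : 1 ≤ pvLoopA lst.length 1 := by
    rcases Nat.eq_zero_or_pos lst.length with h | h
    · rw [h, pvLoopA]; simp
    · exact (pvLoopA_bounds lst.length 1 (by omega) (by simpa)).1
  set r := pvLoopA lst.length 1 with hr
  set k := (max (pvBitLen lst.length) 1 - 1) / 2 with hk
  have hcast : (r : Int) - 1 = (k : Int) := by omega
  show (if (r : Int) - 1 ≥ 6 then (6:Int) else (r : Int) - 1) = min (k : Int) 6
  rw [hcast]
  split_ifs with h <;> omega
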